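-- pv_equiv track=rewrite | github.com/Gearlux/liquify | liquifai/scopes.py | _splice_in_place
-- ===== SOURCE A (Python) =====
-- from typing import Any, Dict, List, Set
--
-- def _splice_in_place(top: Dict[str, Any], wrapper_key: str, block: Dict[str, Any]) -> Dict[str, Any]:
--     """Return a new dict with ``top[wrapper_key]``'s contents replacing the
--     wrapper at the same position. If a content key collides with an existing
--     top-level key, Python dict re-assignment keeps the original position."""
--     out: Dict[str, Any] = {}
--     for k, v in top.items():
--         if k == wrapper_key:
--             for bk, bv in block.items():
--                 out[bk] = bv
--         else:
--             out[k] = v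
--     return out
-- ===== SOURCE B (Python) =====
-- def _splice_in_place(top, wrapper_key, block):
--     """Splice block's items over the wrapper entry positionally: slice the
--     item list around the wrapper's index and let dict() resolve collisions
--     (first-occurrence position, last-occurrence value), instead of branching
--     inside an insertion loop."""
--     items = list(top.items())
--     if wrapper_key in top:
--         i = list(top).index(wrapper_key)
--         items = items[:i] + list(block.items()) + items[i + 1:]
--     return dict(items)
-- ===== Notes on version B (the rewrite author's own statement) =====
-- stated objective: alternative
-- what changed: Instead of a loop over top's items with an in-loop branch inserting block where the wrapper appears, B locates the wrapper's index once, splices the item list positionally (items[:i] + block items + items[i+1:]) and lets dict() resolve key collisions (first-occurrence position, last-occurrence value).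
import Mathlib
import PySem

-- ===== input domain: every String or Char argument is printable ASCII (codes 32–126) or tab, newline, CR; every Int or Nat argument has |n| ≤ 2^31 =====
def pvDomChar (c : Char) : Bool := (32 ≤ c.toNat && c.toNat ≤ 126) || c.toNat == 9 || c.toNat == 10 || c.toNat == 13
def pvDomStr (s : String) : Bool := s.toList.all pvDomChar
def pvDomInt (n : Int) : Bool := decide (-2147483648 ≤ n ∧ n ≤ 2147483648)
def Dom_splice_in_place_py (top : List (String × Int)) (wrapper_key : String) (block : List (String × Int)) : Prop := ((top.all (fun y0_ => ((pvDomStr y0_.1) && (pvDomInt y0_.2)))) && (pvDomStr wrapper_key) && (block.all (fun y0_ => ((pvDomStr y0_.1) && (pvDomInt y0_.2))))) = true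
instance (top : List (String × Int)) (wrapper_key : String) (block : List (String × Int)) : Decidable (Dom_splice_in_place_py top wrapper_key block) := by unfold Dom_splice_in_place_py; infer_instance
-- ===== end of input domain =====

-- B replaces A's branch-inside-an-insertion-loop by a positional slice-and-concatenate of the
-- item list around the wrapper's index, letting dict() resolve key collisions (alternative).

-- ===== PORT A =====
-- literal port of A: one loop over top's items, inserting block's items where k == wrapper_key
def splice_in_place_py (top : List (String × Int)) (wrapper_key : String) (block : List (String × Int)) : List (String × Int) :=
  (top.foldl (fun out kv =>
      if kv.1 == wrapper_key then
        block.foldl (fun o bkv => o.insert bkv.1 bkv.2) out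
      else out.insert kv.1 kv.2) PySem.Dict.empty).items

-- ===== PORT B =====
-- literal port of Source B: items[:i] + list(block.items()) + items[i+1:] when wrapper_key in top, then dict(items)
def splice_in_place_py_alt (top : List (String × Int)) (wrapper_key : String) (block : List (String × Int)) : List (String × Int) :=
  let items :=
    if (top.map Prod.fst).contains wrapper_key then
      match PySem.List.index? (top.map Prod.fst) wrapper_key with
      | some i => PySem.List.slice top none (some (i : Int)) ++ block
                    ++ PySem.List.slice top (some ((i : Int) + 1)) none
      | none => top  -- unreachable: contains implies index? is some
    else top
  (PySem.Dict.ofList items).items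

-- ===== PRECONDITION & SPEC =====
-- Pre_ only states the dict representation invariant: top is a Python dict, so its keys are
-- distinct; duplicate-key association lists are unreachable from the Python programs.
def Pre_splice_in_place_py (top : List (String × Int)) (wrapper_key : String) (block : List (String × Int)) : Prop :=
  (top.map Prod.fst).Nodup
instance (top : List (String × Int)) (wrapper_key : String) (block : List (String × Int)) : Decidable (Pre_splice_in_place_py top wrapper_key block) := by unfold Pre_splice_in_place_py; infer_instance

def pvWitness_splice_in_place_py : (List (String × Int)) × String × (List (String × Int)) :=
  ([("a", 1), ("w", 2), ("c", 3)], "w", [("b", 9), ("a", 7)])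

def Spec_splice_in_place_py (top : List (String × Int)) (wrapper_key : String) (block : List (String × Int)) (out : List (String × Int)) : Prop := out = splice_in_place_py_alt top wrapper_key block
instance (top : List (String × Int)) (wrapper_key : String) (block : List (String × Int)) (out : List (String × Int)) : Decidable (Spec_splice_in_place_py top wrapper_key block out) := by unfold Spec_splice_in_place_py; infer_instance

-- ===== CLAIM (what is proved, stated in full; the proofs are below) =====
def Claim_equal_splice_in_place_py : Prop := ∀ (top : List (String × Int)) (wrapper_key : String) (block : List (String × Int)), Dom_splice_in_place_py top wrapper_key block → Pre_splice_in_place_py top wrapper_key block → Spec_splice_in_place_py top wrapper_key block (splice_in_place_py top wrapper_key block)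

-- ===== LEMMAS AND PROOFS =====

-- the spliced item sequence, as a structural recursion (proof-side characterisation)
def spliced (w : String) (block : List (String × Int)) : List (String × Int) → List (String × Int)
  | [] => []
  | (k, v) :: rest => if k == w then block ++ rest else (k, v) :: spliced w block rest

theorem spliced_of_not_mem (w : String) (block l) (h : w ∉ l.map Prod.fst) :
    spliced w block l = l := by
  induction l with
  | nil => rfl
  | cons kv rest ih =>
    obtain ⟨k, v⟩ := kv
    simp only [List.map_cons, List.mem_cons, not_or] at h
    simp [spliced, Ne.symm h.1, ih h.2]

theorem spliced_of_index_some (w : String) (block l i)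
    (h : PySem.List.index? (l.map Prod.fst) w = some i) :
    spliced w block l = l.take i ++ block ++ l.drop (i + 1) := by
  induction l generalizing i with
  | nil => simp [PySem.List.index?] at h
  | cons kv rest ih =>
    obtain ⟨k, v⟩ := kv
    by_cases hk : k = w
    · subst hk
      rw [show ((k, v) :: rest).map Prod.fst = k :: rest.map Prod.fst from rfl,
        PySem.List.index?_cons_self] at h
      cases h
      simp [spliced]
    · rw [show ((k, v) :: rest).map Prod.fst = k :: rest.map Prod.fst from rfl,
        PySem.List.index?_cons_of_ne _ hk] at h
      cases hj : PySem.List.index? (rest.map Prod.fst) w with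
      | none => rw [hj] at h; simp at h
      | some j =>
        rw [hj] at h
        simp only [Option.map_some] at h
        cases h
        simp [spliced, hk, ih j hj, List.take_succ_cons, List.drop_succ_cons]

theorem foldl_no_wrapper (w : String) (block : List (String × Int)) (l : List (String × Int))
    (h : w ∉ l.map Prod.fst) (d : PySem.Dict String Int) :
    l.foldl (fun out kv =>
        if kv.1 == w then
          block.foldl (fun o bkv => o.insert bkv.1 bkv.2) out
        else out.insert kv.1 kv.2) d
      = l.foldl (fun o kv => o.insert kv.1 kv.2) d := by
  induction l generalizing d with
  | nil => rfl
  | cons kv rest ih =>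
    obtain ⟨k, v⟩ := kv
    simp only [List.map_cons, List.mem_cons, not_or] at h
    simp only [List.foldl_cons]
    rw [if_neg (by simpa using Ne.symm h.1)]
    exact ih h.2 _

theorem foldl_eq_spliced (w : String) (block : List (String × Int)) (l : List (String × Int))
    (hnd : (l.map Prod.fst).Nodup) (d : PySem.Dict String Int) :
    l.foldl (fun out kv =>
        if kv.1 == w then
          block.foldl (fun o bkv => o.insert bkv.1 bkv.2) out
        else out.insert kv.1 kv.2) d
      = (spliced w block l).foldl (fun o kv => o.insert kv.1 kv.2) d := by
  induction l generalizing d with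
  | nil => rfl
  | cons kv rest ih =>
    obtain ⟨k, v⟩ := kv
    simp only [List.map_cons, List.nodup_cons] at hnd
    by_cases hk : k = w
    · subst hk
      simp only [List.foldl_cons, spliced, beq_self_eq_true, if_true, List.foldl_append]
      exact foldl_no_wrapper k block rest hnd.1 _
    · simp only [List.foldl_cons, spliced]
      rw [if_neg (by simpa using hk), if_neg (by simpa using hk)]
      simp only [List.foldl_cons]
      exact ih hnd.2 _

-- B's computed item sequence is exactly `spliced`
theorem alt_items_eq_spliced (top : List (String × Int)) (w : String) (block : List (String × Int)) :
    (if (top.map Prod.fst).contains w then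
        match PySem.List.index? (top.map Prod.fst) w with
        | some i => PySem.List.slice top none (some (i : Int)) ++ block
                      ++ PySem.List.slice top (some ((i : Int) + 1)) none
        | none => top
      else top) = spliced w block top := by
  cases h : PySem.List.index? (top.map Prod.fst) w with
  | none =>
    have hmem : w ∉ top.map Prod.fst := (PySem.List.index?_eq_none_iff _ _).mp h
    rw [if_neg (by simpa using hmem), spliced_of_not_mem w block top hmem]
  | some i =>
    have hmem : w ∈ top.map Prod.fst := by
      have := PySem.List.index?_isSome_iff (top.map Prod.fst) w
      rw [h] at this; simpa using this
    rw [if_pos (by simpa using hmem)]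
    show PySem.List.slice top none (some (i : Int)) ++ block
        ++ PySem.List.slice top (some ((i : Int) + 1)) none = _
    have h1 : PySem.List.slice top none (some (i : Int)) = top.take i :=
      PySem.List.slice_to_natCast top i
    have h2 : PySem.List.slice top (some ((i : Int) + 1)) none = top.drop (i + 1) := by
      have : ((i : Int) + 1) = ((i + 1 : Nat) : Int) := by push_cast; ring
      rw [this, PySem.List.slice_from_natCast]
    rw [h1, h2, spliced_of_index_some w block top i h]

-- dict(items) is the insertion fold
theorem ofList_eq_foldl (l : List (String × Int)) :
    PySem.Dict.ofList l = l.foldl (fun o kv => o.insert kv.1 kv.2) PySem.Dict.empty := by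
  rfl

-- ===== VERDICT (by name: the statement is the Claim_ definition above) =====
theorem splice_in_place_py_spec : Claim_equal_splice_in_place_py := by
  intro top wrapper_key block _hdom hpre
  unfold Spec_splice_in_place_py splice_in_place_py splice_in_place_py_alt
  rw [alt_items_eq_spliced top wrapper_key block]
  show _ = (PySem.Dict.ofList (spliced wrapper_key block top)).items
  rw [ofList_eq_foldl, foldl_eq_spliced wrapper_key block top hpre]
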